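-- pv_equiv track=rewrite | github.com/AkshayGuptaK/cs61a | exam_prep1.py | sandwich
-- ===== SOURCE A (Python) =====
-- def sandwich(n):
--     """Return True if n contains a sandwich and False otherwise
--     >>> sandwich(416263)
--     True
--     >>> sandwich(5050)
--     True
--     >>> sandwich(4441)
--     True
--     >>> sandwich(1231)
--     False
--     >>> sandwich(55)
--     False
--     >>> sandwich(4456)
--     False
--     """
--     tens, ones = (n % 100) // 10, n % 10
--     n = n // 100
--     while n > 0:
--         if n % 10 == ones:
--             return True
--         else:
--             tens, ones = n % 10, tens
--             n = n // 10
--     return False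
-- ===== SOURCE B (Python) =====
-- def sandwich(n):
--     digits = []
--     m = n
--     while m > 0:
--         digits.append(m % 10)
--         m //= 10
--     return any(digits[i] == digits[i + 2] for i in range(len(digits) - 2))
-- ===== Notes on version B (the rewrite author's own statement) =====
-- stated objective: alternative
-- what changed: B first extracts the full digit list with the %10 // 10 loop and then runs a separate index-based any() pass comparing digits two apart, instead of A's interleaved two-scalar sliding window inside the extraction loop.
import Mathlib
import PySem

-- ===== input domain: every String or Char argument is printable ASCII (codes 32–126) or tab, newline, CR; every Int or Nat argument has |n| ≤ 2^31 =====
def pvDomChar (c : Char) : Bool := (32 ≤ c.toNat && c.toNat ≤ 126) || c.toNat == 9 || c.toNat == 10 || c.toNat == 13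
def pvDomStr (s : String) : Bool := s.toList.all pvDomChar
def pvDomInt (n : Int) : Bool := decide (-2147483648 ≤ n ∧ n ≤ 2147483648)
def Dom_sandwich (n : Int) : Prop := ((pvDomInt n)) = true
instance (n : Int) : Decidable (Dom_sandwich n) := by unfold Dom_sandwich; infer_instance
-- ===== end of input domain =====

-- B extracts the full digit list first and then scans it by index in a second pass,
-- instead of A's interleaved two-scalar sliding window; same cost, different structure.

-- termination helper for both loops (cited by decreasing_by)
theorem pvFloordiv10_lt (m : Int) (h : 0 < m) :
    (PySem.Int.floordiv m 10).toNat < m.toNat := by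
  rw [PySem.Int.floordiv_eq_ediv_of_pos (by omega)]
  omega

-- ===== PORT A =====
-- the while loop of A: state (n, tens, ones)
def sandwichLoop (n tens ones : Int) : Bool :=
  if h : 0 < n then
    if PySem.Int.mod n 10 = ones then true
    else sandwichLoop (PySem.Int.floordiv n 10) (PySem.Int.mod n 10) tens
  else false
termination_by n.toNat
decreasing_by exact pvFloordiv10_lt n h

def sandwich (n : Int) : Bool :=
  sandwichLoop (PySem.Int.floordiv n 100)
    (PySem.Int.floordiv (PySem.Int.mod n 100) 10) (PySem.Int.mod n 10)

-- ===== PORT B =====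
-- the digit-extraction loop of B (least-significant first)
def pvDigits (m : Int) : List Int :=
  if h : 0 < m then PySem.Int.mod m 10 :: pvDigits (PySem.Int.floordiv m 10)
  else []
termination_by m.toNat
decreasing_by exact pvFloordiv10_lt m h

def sandwich_alt (n : Int) : Bool :=
  let digits := pvDigits n
  (List.range (digits.length - 2)).any (fun i => digits[i]! == digits[i + 2]!)

-- ===== PRECONDITION & SPEC =====
def Spec_sandwich (n : Int) (out : Bool) : Prop := out = sandwich_alt n
instance (n : Int) (out : Bool) : Decidable (Spec_sandwich n out) := by unfold Spec_sandwich; infer_instance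

-- ===== CLAIM (what is proved, stated in full; the proofs are below) =====
def Claim_equal_sandwich : Prop := ∀ (n : Int), Dom_sandwich n → Spec_sandwich n (sandwich n)

-- ===== LEMMAS AND PROOFS =====

-- structural form of the "digit two places back repeats" check
def pvChk : List Int → Bool
  | a :: b :: c :: t => (a == c) || pvChk (b :: c :: t)
  | _ => false

theorem pvChk_eq_rangeAny (l : List Int) :
    pvChk l = (List.range (l.length - 2)).any (fun i => l[i]! == l[i + 2]!) := by
  match l with
  | [] => simp [pvChk]
  | [a] => simp [pvChk]
  | [a, b] => simp [pvChk]
  | a :: b :: c :: t =>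
    have ih := pvChk_eq_rangeAny (b :: c :: t)
    simp only [pvChk, List.length_cons]
    have hlen : t.length + 1 + 1 + 1 - 2 = t.length + 1 := by omega
    have hlen2 : t.length + 1 + 1 - 2 = t.length := by omega
    simp only [List.length_cons] at ih
    rw [hlen, List.range_succ_eq_map]
    simp only [List.any_cons, List.any_map]
    rw [hlen2] at ih
    simp only [List.getElem!_cons_zero, List.getElem!_cons_succ]
    rw [ih]
    congr 1

theorem pvDigits_pos (m : Int) (h : 0 < m) :
    pvDigits m = PySem.Int.mod m 10 :: pvDigits (PySem.Int.floordiv m 10) := by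
  rw [pvDigits]; simp [h]

theorem pvDigits_nonpos (m : Int) (h : ¬ 0 < m) : pvDigits m = [] := by
  rw [pvDigits]; simp [h]

theorem pvLoop_eq_chk (k : Nat) (m tens ones : Int) (hk : m.toNat ≤ k) :
    sandwichLoop m tens ones = pvChk (ones :: tens :: pvDigits m) := by
  induction k generalizing m tens ones with
  | zero =>
    have hm : ¬ 0 < m := by omega
    rw [sandwichLoop, pvDigits_nonpos m hm]
    simp [hm, pvChk]
  | succ k ih =>
    rw [sandwichLoop]
    by_cases hm : 0 < m
    · simp only [hm, dif_pos]
      have hrec : (PySem.Int.floordiv m 10).toNat ≤ k := by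
        have := pvFloordiv10_lt m hm; omega
      rw [ih _ _ _ hrec, pvDigits_pos m hm]
      have hbeq : ∀ a b : Int, (a == b) = decide (a = b) := fun _ _ => rfl
      by_cases he : PySem.Int.mod m 10 = ones <;>
        simp [pvChk, hbeq, eq_comm]
    · rw [pvDigits_nonpos m hm]
      simp [hm, pvChk]

-- digit/arithmetic bookkeeping: (n % 100) // 10 = (n // 10) % 10 and the digit-list shape
theorem pvTens_eq (n : Int) :
    PySem.Int.floordiv (PySem.Int.mod n 100) 10
      = PySem.Int.mod (PySem.Int.floordiv n 10) 10 := by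
  rw [PySem.Int.floordiv_eq_ediv_of_pos (a := n) (by omega),
      PySem.Int.floordiv_eq_ediv_of_pos (by omega),
      PySem.Int.mod_eq_emod_of_pos (by omega),
      PySem.Int.mod_eq_emod_of_pos (by omega)]
  omega

theorem pvFloordiv100 (n : Int) :
    PySem.Int.floordiv n 100 = PySem.Int.floordiv (PySem.Int.floordiv n 10) 10 := by
  rw [PySem.Int.floordiv_eq_ediv_of_pos (a := n) (by omega),
      PySem.Int.floordiv_eq_ediv_of_pos (a := n) (by omega),
      PySem.Int.floordiv_eq_ediv_of_pos (by omega)]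
  omega

-- ===== VERDICT (by name: the statement is the Claim_ definition above) =====
theorem sandwich_spec : Claim_equal_sandwich := by
  intro n _
  show sandwich n = sandwich_alt n
  unfold sandwich sandwich_alt
  rw [pvLoop_eq_chk (PySem.Int.floordiv n 100).toNat _ _ _ le_rfl]
  rw [← pvChk_eq_rangeAny]
  rw [pvTens_eq, pvFloordiv100]
  by_cases hn : 0 < n
  · rw [pvDigits_pos n hn]
    by_cases hn10 : 0 < PySem.Int.floordiv n 10
    · rw [pvDigits_pos _ hn10]
    · -- single-digit positive n: both checks see too few digits and are false
      have h100 : ¬ 0 < PySem.Int.floordiv (PySem.Int.floordiv n 10) 10 := by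
        rw [PySem.Int.floordiv_eq_ediv_of_pos (by omega)]
        rw [PySem.Int.floordiv_eq_ediv_of_pos (by omega)] at hn10 ⊢
        omega
      rw [pvDigits_nonpos _ hn10, pvDigits_nonpos _ h100]
      simp [pvChk]
  · -- n ≤ 0: digits empty, loop never runs
    have h100 : ¬ 0 < PySem.Int.floordiv (PySem.Int.floordiv n 10) 10 := by
      rw [PySem.Int.floordiv_eq_ediv_of_pos (by omega),
          PySem.Int.floordiv_eq_ediv_of_pos (by omega)]
      omega
    rw [pvDigits_nonpos _ hn, pvDigits_nonpos _ h100]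
    simp [pvChk]
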